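-- pv_equiv track=rewrite | github.com/Sakyi-Ken/RAG-Tuts | Lesson-1/Intro-1.py | rag_retrieval
-- ===== SOURCE A (Python) =====
-- def rag_retrieval(query, documents):
--     query_words = set(query.lower().split())
--     best_doc_id = None
--     best_overlap = 0
--
--     for doc_id, doc in documents.items():
--         # Compare the query words with the document's content words
--         doc_words = set(doc["content"].lower().split() + doc["title"].lower().split())
--         overlap = len(query_words.intersection(doc_words))
--
--         if overlap > best_overlap:
--             best_overlap = overlap
--             best_doc_id = doc_id
--
--     # Return the best document, or None if nothing matched
--     return documents.get(best_doc_id)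
-- ===== SOURCE B (Python) =====
-- def rag_retrieval(query, documents):
--     # Inverted index: word -> set of doc_ids whose content/title contain it.
--     index = {}
--     for doc_id, doc in documents.items():
--         words = set(doc["content"].lower().split()) | set(doc["title"].lower().split())
--         for w in words:
--             index.setdefault(w, set()).add(doc_id)
--     # Query-word-driven counting of overlaps.
--     counts = {}
--     for w in set(query.lower().split()):
--         for doc_id in index.get(w, ()):
--             counts[doc_id] = counts.get(doc_id, 0) + 1
--     # First doc in insertion order with a strictly maximal positive count.
--     best_doc_id = None
--     best_count = 0
--     for doc_id in documents:
--         c = counts.get(doc_id, 0)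
--         if c > best_count:
--             best_doc_id = doc_id
--             best_count = c
--     return documents.get(best_doc_id)
-- ===== Notes on version B (the rewrite author's own statement) =====
-- stated objective: alternative
-- what changed: Replaces A's document-driven scan that builds a word set per document and intersects it with the query set by a query-word-driven scheme: one pass builds an inverted index (word -> set of doc ids), distinct query words then bump per-doc counters via index lookups, and a final insertion-order scan picks the first id with a strictly maximal positive count.
import Mathlib
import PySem

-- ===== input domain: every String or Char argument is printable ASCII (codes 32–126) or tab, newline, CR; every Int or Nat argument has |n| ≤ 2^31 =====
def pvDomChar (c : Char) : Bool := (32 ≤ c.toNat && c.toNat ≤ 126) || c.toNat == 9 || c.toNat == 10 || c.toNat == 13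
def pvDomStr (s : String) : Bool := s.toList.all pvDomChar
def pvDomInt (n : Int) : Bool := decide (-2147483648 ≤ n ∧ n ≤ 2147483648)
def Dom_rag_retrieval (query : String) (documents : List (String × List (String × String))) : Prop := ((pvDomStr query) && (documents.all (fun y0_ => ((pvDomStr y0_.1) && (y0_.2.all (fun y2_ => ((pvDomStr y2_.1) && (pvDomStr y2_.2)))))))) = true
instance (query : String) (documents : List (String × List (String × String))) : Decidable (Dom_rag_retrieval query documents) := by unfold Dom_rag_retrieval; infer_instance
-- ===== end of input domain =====

-- B replaces A's per-document set intersection with an inverted index (word → doc-id set) filled once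
-- and then driven by the distinct query words; objective: alternative (same cost class, inverted traversal).

-- ===== PORT A =====
-- shared boundary helpers: the query-word set and the dict parameter under the assoc-list convention
def pvQWords (query : String) : PySem.Set String :=
  PySem.Set.ofList (PySem.Str.split₀ (PySem.Str.lower query))

def pvDocsDict (documents : List (String × List (String × String))) :
    PySem.Dict String (PySem.Dict String String) :=
  PySem.Dict.ofList (documents.map (fun kv => (kv.1, PySem.Dict.ofList kv.2)))

-- set(doc["content"].lower().split() + doc["title"].lower().split()); getD is exact under Pre_ (keys present)
def pvWordsA (doc : PySem.Dict String String) : PySem.Set String :=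
  PySem.Set.ofList (PySem.Str.split₀ (PySem.Str.lower (doc.getD "content" "")) ++
                    PySem.Str.split₀ (PySem.Str.lower (doc.getD "title" "")))

def rag_retrieval (query : String) (documents : List (String × List (String × String))) : Option (List (String × String)) :=
  let query_words := pvQWords query
  let docs := pvDocsDict documents
  let st := docs.items.foldl
    (fun (st : Option String × Nat) kv =>
      if st.2 < (PySem.Set.inter query_words (pvWordsA kv.2)).length then
        (some kv.1, (PySem.Set.inter query_words (pvWordsA kv.2)).length)
      else st)
    (none, 0)
  match st.1 with
  | none => none          -- documents.get(None): no string key equals None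
  | some k => (docs.get? k).map PySem.Dict.items

-- ===== PORT B =====
-- set(doc["content"].lower().split()) | set(doc["title"].lower().split())
def pvWordsB (doc : PySem.Dict String String) : PySem.Set String :=
  PySem.Set.union (PySem.Set.ofList (PySem.Str.split₀ (PySem.Str.lower (doc.getD "content" ""))))
                  (PySem.Set.ofList (PySem.Str.split₀ (PySem.Str.lower (doc.getD "title" ""))))

-- for doc_id, doc in documents.items(): for w in words: index.setdefault(w, set()).add(doc_id)
def pvIndex (docs : List (String × PySem.Dict String String)) : PySem.Dict String (PySem.Set String) :=
  docs.foldl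
    (fun idx kv =>
      (pvWordsB kv.2).foldl
        (fun idx w => idx.modify w PySem.Set.empty (fun s => PySem.Set.add s kv.1)) idx)
    PySem.Dict.empty

-- for w in set(query...): for doc_id in index.get(w, ()): counts[doc_id] = counts.get(doc_id, 0) + 1
def pvCounts (index : PySem.Dict String (PySem.Set String)) (qws : List String) : PySem.Dict String Nat :=
  qws.foldl
    (fun cnts w =>
      (index.getD w PySem.Set.empty).foldl (fun cnts d => cnts.modify d 0 (· + 1)) cnts)
    PySem.Dict.empty

def rag_retrieval_alt (query : String) (documents : List (String × List (String × String))) : Option (List (String × String)) :=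
  let docs := pvDocsDict documents
  let counts := pvCounts (pvIndex docs.items) (pvQWords query)
  let st := docs.keys.foldl
    (fun (st : Option String × Nat) k =>
      if st.2 < counts.getD k 0 then (some k, counts.getD k 0) else st)
    (none, 0)
  match st.1 with
  | none => none
  | some k => (docs.get? k).map PySem.Dict.items

-- ===== PRECONDITION & SPEC =====
-- Pre_ excludes exactly the inputs on which Python A raises KeyError: a document missing the "content" or "title" key.
def Pre_rag_retrieval (query : String) (documents : List (String × List (String × String))) : Prop :=
  ∀ kv ∈ documents, "content" ∈ kv.2.map Prod.fst ∧ "title" ∈ kv.2.map Prod.fst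
instance (query : String) (documents : List (String × List (String × String))) : Decidable (Pre_rag_retrieval query documents) := by unfold Pre_rag_retrieval; infer_instance

def pvWitness_rag_retrieval : String × (List (String × List (String × String))) :=
  ("hello world", [("d1", [("content", "hello there"), ("title", "greetings")])])

def Spec_rag_retrieval (query : String) (documents : List (String × List (String × String))) (out : Option (List (String × String))) : Prop := out = rag_retrieval_alt query documents
instance (query : String) (documents : List (String × List (String × String))) (out : Option (List (String × String))) : Decidable (Spec_rag_retrieval query documents out) := by unfold Spec_rag_retrieval; infer_instance

-- ===== CLAIM (what is proved, stated in full; the proofs are below) =====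
def Claim_equal_rag_retrieval : Prop := ∀ (query : String) (documents : List (String × List (String × String))), Dom_rag_retrieval query documents → Pre_rag_retrieval query documents → Spec_rag_retrieval query documents (rag_retrieval query documents)

-- ===== LEMMAS AND PROOFS =====

-- a modify-fold over a duplicate-free key list touches each key at most once
theorem pv_getD_foldl_modify {κ ν : Type} [BEq κ] [LawfulBEq κ] [DecidableEq κ]
    (l : List κ) (hl : l.Nodup) (d : PySem.Dict κ ν) (d0 : ν) (f : ν → ν) (k : κ) :
    (l.foldl (fun d x => d.modify x d0 f) d).getD k d0 =
      if k ∈ l then f (d.getD k d0) else d.getD k d0 := by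
  induction l generalizing d with
  | nil => simp
  | cons x xs ih =>
    rcases List.nodup_cons.mp hl with ⟨hx, hxs⟩
    simp only [List.foldl_cons]
    rw [ih hxs]
    by_cases hk : k ∈ xs
    · have hne : k ≠ x := fun h => hx (h ▸ hk)
      simp [hk, hne, PySem.Dict.getD_modify]
    · by_cases hkx : k = x
      · subst hkx
        simp [hk]
      · simp [hk, hkx, PySem.Dict.getD_modify]

-- the inverted index at word w lists, in order, the ids of the documents containing w
theorem pv_index_getD (docs : List (String × PySem.Dict String String))
    (hnd : (docs.map Prod.fst).Nodup) (w : String) :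
    (pvIndex docs).getD w PySem.Set.empty =
      (docs.filter (fun kv => decide (w ∈ pvWordsB kv.2))).map Prod.fst := by
  induction docs using List.reverseRecOn with
  | nil => rfl
  | append_singleton ds kv ih =>
    have hmap : (ds.map Prod.fst).Nodup ∧ kv.1 ∉ ds.map Prod.fst := by
      rw [List.map_append] at hnd
      have h := List.nodup_append.mp hnd
      exact ⟨h.1, fun hm => h.2.2 kv.1 hm kv.1 (by simp) rfl⟩
    have hw : (pvWordsB kv.2).Nodup :=
      PySem.Set.nodup_union _ _ (PySem.Set.nodup_ofList _)
    rw [show pvIndex (ds ++ [kv]) =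
        (pvWordsB kv.2).foldl
          (fun idx w => idx.modify w PySem.Set.empty (fun s => PySem.Set.add s kv.1)) (pvIndex ds) from by
      simp [pvIndex, List.foldl_append]]
    rw [pv_getD_foldl_modify _ hw _ _ _ w, ih hmap.1]
    by_cases hmem : w ∈ pvWordsB kv.2
    · have hnotin : kv.1 ∉ (ds.filter (fun kv => decide (w ∈ pvWordsB kv.2))).map Prod.fst := by
        intro h
        exact hmap.2 ((List.filter_sublist.map Prod.fst).subset h)
      simp [hmem, List.filter_append, PySem.Set.add_of_not_mem hnotin]
    · simp [hmem, List.filter_append]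

-- the count dict holds, for every id, the number of distinct query words the index maps to it
theorem pv_counts_getD (index : PySem.Dict String (PySem.Set String))
    (h : ∀ w, (index.getD w PySem.Set.empty).Nodup) (qws : List String) (d : String) :
    (pvCounts index qws).getD d 0 =
      qws.countP (fun w => decide (d ∈ index.getD w PySem.Set.empty)) := by
  induction qws using List.reverseRecOn with
  | nil => rfl
  | append_singleton ws w ih =>
    rw [show pvCounts index (ws ++ [w]) =
        (index.getD w PySem.Set.empty).foldl (fun cnts d => cnts.modify d 0 (· + 1)) (pvCounts index ws) from by
      simp [pvCounts, List.foldl_append]]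
    rw [pv_getD_foldl_modify _ (h w) _ 0 _ d, ih]
    by_cases hd : d ∈ index.getD w PySem.Set.empty <;>
      simp only [PySem.Set.empty] at hd <;> simp [hd, List.countP_append]

-- per document, B's query-driven count equals A's set-intersection overlap
theorem pv_score_eq (qws : List String) (docs : PySem.Dict String (PySem.Dict String String))
    (hnd : docs.keys.Nodup) (kv : String × PySem.Dict String String) (hkv : kv ∈ docs.items) :
    (pvCounts (pvIndex docs.items) qws).getD kv.1 0 =
      (PySem.Set.inter qws (pvWordsA kv.2)).length := by
  have hnd' : (docs.items.map Prod.fst).Nodup := hnd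
  have hidxnd : ∀ w, ((pvIndex docs.items).getD w PySem.Set.empty).Nodup := by
    intro w
    rw [pv_index_getD _ hnd' w]
    exact hnd'.sublist (List.filter_sublist.map Prod.fst)
  rw [pv_counts_getD _ hidxnd]
  rw [show PySem.Set.inter qws (pvWordsA kv.2) =
      qws.filter (fun x => PySem.Set.contains (pvWordsA kv.2) x) from rfl]
  rw [← List.countP_eq_length_filter]
  apply List.countP_congr
  intro w _
  have hmem : kv.1 ∈ (docs.items.filter (fun kv => decide (w ∈ pvWordsB kv.2))).map Prod.fst ↔
      w ∈ pvWordsA kv.2 := by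
    constructor
    · intro h
      rcases List.mem_map.mp h with ⟨a, ha, hfst⟩
      rcases List.mem_filter.mp ha with ⟨hain, hdec⟩
      have h1 : docs.get? a.1 = some a.2 :=
        (PySem.Dict.get?_eq_some_iff_mem_items docs a.1 a.2 hnd).mpr (by exact hain)
      have h2 : docs.get? kv.1 = some kv.2 :=
        (PySem.Dict.get?_eq_some_iff_mem_items docs kv.1 kv.2 hnd).mpr hkv
      rw [hfst, h2] at h1
      have hw : w ∈ pvWordsB a.2 := of_decide_eq_true hdec
      rw [Option.some.injEq] at h1
      rw [← h1] at hw
      simp only [pvWordsA, pvWordsB, PySem.Set.mem_ofList, PySem.Set.mem_union,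
        List.mem_append] at hw ⊢
      exact hw
    · intro h
      refine List.mem_map.mpr ⟨kv, List.mem_filter.mpr ⟨hkv, decide_eq_true ?_⟩, rfl⟩
      simp only [pvWordsA, pvWordsB, PySem.Set.mem_ofList, PySem.Set.mem_union,
        List.mem_append] at h ⊢
      exact h
  rw [pv_index_getD _ hnd' w]
  simp only [decide_eq_true_eq, PySem.Set.contains_iff]
  exact hmem

-- the two selection scans (A over items with overlaps, B over keys with counts) agree
theorem pv_fold_eq (qws : List String) (docs : PySem.Dict String (PySem.Dict String String))
    (hnd : docs.keys.Nodup) :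
    docs.items.foldl
      (fun (st : Option String × Nat) kv =>
        if st.2 < (PySem.Set.inter qws (pvWordsA kv.2)).length then
          (some kv.1, (PySem.Set.inter qws (pvWordsA kv.2)).length)
        else st) (none, 0) =
    docs.keys.foldl
      (fun (st : Option String × Nat) k =>
        if st.2 < (pvCounts (pvIndex docs.items) qws).getD k 0 then
          (some k, (pvCounts (pvIndex docs.items) qws).getD k 0)
        else st) (none, 0) := by
  rw [show docs.keys = docs.items.map Prod.fst from rfl, List.foldl_map]
  exact (PySem.List.foldl_congr_mem _ _ _ _
    (fun acc kv hkv => by rw [pv_score_eq qws docs hnd kv hkv])).symm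

-- ===== VERDICT (by name: the statement is the Claim_ definition above) =====
theorem rag_retrieval_spec : Claim_equal_rag_retrieval := by
  intro query documents _dom _pre
  unfold Spec_rag_retrieval
  simp only [rag_retrieval, rag_retrieval_alt]
  rw [pv_fold_eq (pvQWords query) (pvDocsDict documents)
      (PySem.Dict.nodup_keys_ofList _)]
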